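-- pv_equiv track=rewrite | github.com/marius-bughiu/semicolon-wars | src/python/arena.py | find_all_palindromes
-- ===== SOURCE A (Python) =====
-- from typing import List, Optional, Union
--
-- def isPalindrome(s):
-- 	s = s.lower()
-- 	s = ''.join([c for c in s if c.isalnum()])
-- 	i = 0
-- 	j = len(s) - 1
-- 	while i < j:
-- 		if s[i] != s[j]:
-- 			return False
-- 		i = i + 1
-- 		j = j - 1
-- 	return True
--
-- def find_all_palindromes(words: List[Optional[Union[str, bytes]]]) -> List[str]:
--     result: List[str] = []
--     for w in words:
--         if w == None:
--             continue
--         if isinstance(w, bytes):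
--             w = w.decode("utf-8")
--         if isPalindrome(w) == True:
--             result.append(w)
--     return result
-- ===== SOURCE B (Python) =====
-- def _is_palindrome(w):
--     cleaned = ''.join(c for c in w.lower() if c.isalnum())
--     return cleaned == cleaned[::-1]
--
--
-- def find_all_palindromes(words):
--     decoded = (w.decode("utf-8") if isinstance(w, bytes) else w
--                for w in words if w is not None)
--     return [w for w in decoded if _is_palindrome(w)]
-- ===== Notes on version B (the rewrite author's own statement) =====
-- stated objective: idiomatic
-- what changed: Replaces the two-pointer index while-loop palindrome test with the idiomatic reverse-and-compare (cleaned == cleaned[::-1]) and expresses the filter as a generator + list comprehension instead of an accumulator loop.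
import Mathlib
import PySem

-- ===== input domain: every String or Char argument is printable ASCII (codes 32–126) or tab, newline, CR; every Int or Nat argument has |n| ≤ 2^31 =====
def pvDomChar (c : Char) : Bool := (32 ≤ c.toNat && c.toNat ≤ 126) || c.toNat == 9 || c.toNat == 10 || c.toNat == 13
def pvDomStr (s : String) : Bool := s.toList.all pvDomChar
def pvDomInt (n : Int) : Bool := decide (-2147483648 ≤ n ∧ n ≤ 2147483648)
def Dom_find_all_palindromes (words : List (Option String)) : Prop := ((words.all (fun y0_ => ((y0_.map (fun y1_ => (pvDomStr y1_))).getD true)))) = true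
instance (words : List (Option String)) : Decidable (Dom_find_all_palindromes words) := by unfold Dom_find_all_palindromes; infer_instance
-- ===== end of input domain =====

-- B replaces A's two-pointer while-loop palindrome test with reverse-and-compare and the
-- accumulator loop with a comprehension over the non-None words (idiomatic; same cost).
-- Under the type convention inputs are Option String, so the bytes branch (utf-8 decode
-- of an already-ASCII word) is the identity in both ports.

-- ===== PORT A =====
-- while i < j: if s[i] != s[j]: return False; i += 1; j -= 1   (indices are always in
-- range when read, so s[i] is ported as pyGetD with an unused default)
def pvLoopA (cs : List Char) (i j : Int) : Bool :=
  if _h : i < j then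
    if PySem.List.pyGetD cs i ' ' != PySem.List.pyGetD cs j ' ' then false
    else pvLoopA cs (i + 1) (j - 1)
  else true
termination_by (j - i).toNat
decreasing_by omega

def isPalindromeA (s : String) : Bool :=
  let s1 := PySem.Str.lower s
  let s2 := s1.toList.filter PySem.Chars.isalnum   -- ''.join([c for c in s if c.isalnum()])
  pvLoopA s2 0 ((s2.length : Int) - 1)

def find_all_palindromes (words : List (Option String)) : List String :=
  words.foldl (fun result w =>
    match w with
    | none => result                                   -- if w == None: continue
    | some w => if isPalindromeA w == true then result ++ [w] else result) []

-- ===== PORT B =====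
def isPalindromeB (w : String) : Bool :=
  let cleaned := (PySem.Str.lower w).toList.filter PySem.Chars.isalnum
  cleaned == cleaned.reverse                           -- cleaned == cleaned[::-1]

def find_all_palindromes_alt (words : List (Option String)) : List String :=
  (words.filterMap id).filter isPalindromeB

-- ===== PRECONDITION & SPEC =====
def Spec_find_all_palindromes (words : List (Option String)) (out : List String) : Prop := out = find_all_palindromes_alt words
instance (words : List (Option String)) (out : List String) : Decidable (Spec_find_all_palindromes words out) := by unfold Spec_find_all_palindromes; infer_instance

-- ===== CLAIM (what is proved, stated in full; the proofs are below) =====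
def Claim_equal_find_all_palindromes : Prop := ∀ (words : List (Option String)), Dom_find_all_palindromes words → Spec_find_all_palindromes words (find_all_palindromes words)

-- ===== LEMMAS AND PROOFS =====

-- Shifting the two-pointer loop past one element at each end of the list.
theorem pvLoopA_shift (a b : Char) (l : List Char) :
    ∀ i j : Int, 0 ≤ i → j < l.length →
      pvLoopA (a :: (l ++ [b])) (i + 1) (j + 1) = pvLoopA l i j := by
  intro i j
  induction hn : (j - i).toNat using Nat.strong_induction_on generalizing i j with
  | _ n ih =>
    intro hi hj
    conv_lhs => rw [pvLoopA]
    conv_rhs => rw [pvLoopA]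
    by_cases h : i < j
    · rw [dif_pos (show i + 1 < j + 1 by omega), dif_pos h]
      have hgi : PySem.List.pyGetD (a :: (l ++ [b])) (i + 1) ' ' = PySem.List.pyGetD l i ' ' := by
        rw [PySem.List.pyGetD_eq_getElem _ _ (by omega)
              (by simp only [List.length_cons, List.length_append, List.length_nil]; omega),
            PySem.List.pyGetD_eq_getElem _ _ (by omega) (by omega)]
        rw [getElem_congr rfl (show (i + 1).toNat = i.toNat + 1 by omega)
              (by simp only [List.length_cons, List.length_append, List.length_nil]; omega)]
        rw [List.getElem_cons_succ, List.getElem_append_left (by omega)]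
      have hgj : PySem.List.pyGetD (a :: (l ++ [b])) (j + 1) ' ' = PySem.List.pyGetD l j ' ' := by
        rw [PySem.List.pyGetD_eq_getElem _ _ (by omega)
              (by simp only [List.length_cons, List.length_append, List.length_nil]; omega),
            PySem.List.pyGetD_eq_getElem _ _ (by omega) (by omega)]
        rw [getElem_congr rfl (show (j + 1).toNat = j.toNat + 1 by omega)
              (by simp only [List.length_cons, List.length_append, List.length_nil]; omega)]
        rw [List.getElem_cons_succ, List.getElem_append_left (by omega)]
      rw [hgi, hgj]
      have hrec : pvLoopA (a :: (l ++ [b])) (i + 1 + 1) (j + 1 - 1) = pvLoopA l (i + 1) (j - 1) := by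
        rw [show j + 1 - 1 = (j - 1) + 1 by ring]
        exact ih (j - 1 - (i + 1)).toNat (by omega) (i + 1) (j - 1) rfl (by omega) (by omega)
      rw [hrec]
    · rw [dif_neg (show ¬ (i + 1 < j + 1) by omega), dif_neg h]

-- A's two-pointer scan from the ends decides "the list equals its reverse".
theorem pvLoopA_palindrome (cs : List Char) :
    pvLoopA cs 0 ((cs.length : Int) - 1) = (cs == cs.reverse) := by
  induction cs using List.bidirectionalRec with
  | nil => rw [pvLoopA]; simp
  | singleton a => rw [pvLoopA]; simp
  | cons_append a l b ih =>
    conv_lhs => rw [pvLoopA]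
    rw [dif_pos (show (0 : Int) < ((a :: (l ++ [b])).length : Int) - 1 by
          simp only [List.length_cons, List.length_append, List.length_nil]; push_cast; omega)]
    have hga : PySem.List.pyGetD (a :: (l ++ [b])) 0 ' ' = a := by
      rw [PySem.List.pyGetD_eq_getElem _ _ (by omega)
            (by simp only [List.length_cons, List.length_append, List.length_nil]; omega)]
      rfl
    have hgb : PySem.List.pyGetD (a :: (l ++ [b])) (((a :: (l ++ [b])).length : Int) - 1) ' ' = b := by
      rw [PySem.List.pyGetD_eq_getElem _ _
            (by simp only [List.length_cons, List.length_append, List.length_nil]; push_cast; omega)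
            (by simp only [List.length_cons, List.length_append, List.length_nil]; push_cast; omega)]
      rw [getElem_congr rfl (show ((((a :: (l ++ [b])).length : Int)) - 1).toNat = l.length + 1 by
            simp only [List.length_cons, List.length_append, List.length_nil]; push_cast; omega)
            (by simp only [List.length_cons, List.length_append, List.length_nil]; omega)]
      rw [List.getElem_cons_succ, List.getElem_append_right (by omega)]
      simp
    rw [hga, hgb]
    by_cases hab : a = b
    · subst hab
      rw [if_neg (by simp)]
      have hlen1 : ((a :: (l ++ [a])).length : Int) - 1 - 1 = ((l.length : Int) - 1) + 1 := by
        simp only [List.length_cons, List.length_append, List.length_nil]; push_cast; omega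
      rw [hlen1, show (0 : Int) + 1 = 0 + 1 from rfl,
          pvLoopA_shift a a l 0 ((l.length : Int) - 1) le_rfl (by omega), ih]
      rw [Bool.eq_iff_iff, beq_iff_eq, beq_iff_eq]
      rw [List.reverse_cons, List.reverse_append, List.reverse_singleton,
          List.singleton_append, List.cons_append]
      simp
    · rw [if_pos (by simp [hab])]
      rw [Bool.eq_iff_iff, beq_iff_eq]
      rw [List.reverse_cons, List.reverse_append, List.reverse_singleton,
          List.singleton_append, List.cons_append]
      simp [hab]

theorem isPal_agree (s : String) : isPalindromeA s = isPalindromeB s := by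
  simp only [isPalindromeA, isPalindromeB]
  exact pvLoopA_palindrome _

theorem fold_filter (words : List (Option String)) : ∀ acc : List String,
    words.foldl (fun result w =>
      match w with
      | none => result
      | some w => if isPalindromeA w == true then result ++ [w] else result) acc
    = acc ++ (words.filterMap id).filter isPalindromeB := by
  induction words with
  | nil => intro acc; simp
  | cons w ws ih =>
    intro acc
    cases w with
    | none =>
      rw [show List.filterMap id (none :: ws) = List.filterMap id ws by simp]
      exact ih acc
    | some v =>
      rw [show List.filterMap id (some v :: ws) = v :: List.filterMap id ws by simp]
      have ha := isPal_agree v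
      by_cases hv : isPalindromeB v
      · rw [List.filter_cons, if_pos (by simp [hv])]
        have h1 : (if isPalindromeA v == true then acc ++ [v] else acc) = acc ++ [v] := by
          simp [ha, hv]
        show List.foldl _ (if isPalindromeA v == true then acc ++ [v] else acc) ws = _
        rw [h1, ih (acc ++ [v]), List.append_assoc, List.singleton_append]
      · rw [List.filter_cons, if_neg (by simp [hv])]
        have h1 : (if isPalindromeA v == true then acc ++ [v] else acc) = acc := by
          simp [ha, hv]
        show List.foldl _ (if isPalindromeA v == true then acc ++ [v] else acc) ws = _
        rw [h1, ih acc]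

-- ===== VERDICT (by name: the statement is the Claim_ definition above) =====
theorem find_all_palindromes_spec : Claim_equal_find_all_palindromes := by
  intro words _
  show find_all_palindromes words = find_all_palindromes_alt words
  unfold find_all_palindromes find_all_palindromes_alt
  simpa using fold_filter words []
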